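-- pv_equiv track=rewrite | github.com/JJMLG/JJMLG | 03.19 ~ 03.26 초심 잡고 열심히/E - 1941 소문난 칠공주/동현.py | dfs
-- ===== SOURCE A (Python) =====
-- from collections import deque
--
-- dx = [-1,1,0,0]
--
-- dy = [0,0,-1,1]
--
-- def dfs(comb):
--     visited = [False]*7
--     queue = deque()
--     queue.append(comb[0])
--     visited[0] = True
--
--     while queue:
--         x, y = queue.popleft()
--         for k in range(4):
--             nx = x + dx[k]
--             ny = y + dy[k]
--
--             if (nx, ny) in comb:
--                 nextIdx = comb.index((nx, ny))
--                 if not visited[nextIdx]: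
--                     queue.append((nx, ny))
--                     visited[nextIdx] = True
--
--     if False in visited:
--         return False
--     else:
--         return True
-- ===== SOURCE B (Python) =====
-- def dfs(comb):
--     # The seven spots must be exactly 7 distinct cells; otherwise they can
--     # never form the seven connected princesses.
--     if len(comb) != 7 or len(set(comb)) != 7:
--         return False
--     # Round-based saturation instead of a BFS queue: starting from cell 0,
--     # six simultaneous rounds mark every cell orthogonally adjacent to an
--     # already marked cell (7 cells saturate in at most 6 rounds).
--     reach = [i == 0 for i in range(7)]
--     for _ in range(6):
--         reach = [reach[i] or any(reach[j]
--                                  and abs(comb[i][0] - comb[j][0])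
--                                    + abs(comb[i][1] - comb[j][1]) == 1
--                                  for j in range(7))
--                  for i in range(7)]
--     return all(reach)
-- ===== Notes on version B (the rewrite author's own statement) =====
-- stated objective: alternative
-- what changed: Replaces the queue-based BFS with visited flags by an explicit '7 distinct cells' validation followed by a queue-free round-based saturation: six simultaneous rounds mark every cell orthogonally adjacent to an already marked cell, then all flags are checked.
import Mathlib
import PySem

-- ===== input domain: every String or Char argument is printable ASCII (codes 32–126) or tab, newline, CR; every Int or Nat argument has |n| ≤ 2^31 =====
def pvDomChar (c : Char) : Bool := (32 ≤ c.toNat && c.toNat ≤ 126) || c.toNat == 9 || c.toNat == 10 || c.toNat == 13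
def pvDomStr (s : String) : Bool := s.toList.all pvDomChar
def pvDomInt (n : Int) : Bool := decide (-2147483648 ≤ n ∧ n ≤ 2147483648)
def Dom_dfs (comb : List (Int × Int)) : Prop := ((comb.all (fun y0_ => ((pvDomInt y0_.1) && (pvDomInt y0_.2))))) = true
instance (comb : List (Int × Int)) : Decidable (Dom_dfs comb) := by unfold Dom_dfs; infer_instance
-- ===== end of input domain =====

-- B replaces A's queue-based BFS by a '7 distinct cells' validation plus a queue-free fixed-round
-- saturation of the adjacency relation (alternative decomposition, similar cost at the fixed size 7);
-- equivalence proved on nonempty lists of at most 7 cells (longer lists can make A raise IndexError).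


-- ===== PORT A =====
def dxA : List Int := [-1, 1, 0, 0]
def dyA : List Int := [0, 0, -1, 1]

-- body of `for k in range(4)`: one neighbour direction of the popped cell (x, y);
-- state is (queue-after-the-popleft, visited)
def dfsStep (comb : List (Int × Int)) (x y : Int)
    (st : List (Int × Int) × List Bool) (k : Nat) : List (Int × Int) × List Bool :=
  let nx := x + dxA.getD k 0
  let ny := y + dyA.getD k 0
  if (nx, ny) ∈ comb then
    match PySem.List.index? comb (nx, ny) with
    | some nextIdx =>
        -- Python reads visited[nextIdx]; on Pre_ inputs nextIdx < 7 = len(visited)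
        if st.2.getD nextIdx false then st
        else (st.1 ++ [(nx, ny)], st.2.set nextIdx true)
    | none => st  -- unreachable: membership was just checked
  else st

-- the `while queue:` loop.  Fuel 13 = 2*(#initially-unvisited) + 1 bounds the number of
-- iterations on every Pre_ input (proved below), so it never cuts the Python loop short there.
def dfsLoop (comb : List (Int × Int)) : Nat → List (Int × Int) → List Bool → List Bool
  | 0, _, vis => vis
  | _ + 1, [], vis => vis
  | fuel + 1, (x, y) :: rest, vis =>
      let st := (List.range 4).foldl (dfsStep comb x y) (rest, vis)
      dfsLoop comb fuel st.1 st.2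

def dfs (comb : List (Int × Int)) : Bool :=
  let visited := (List.replicate 7 false).set 0 true
  let queue := [comb.getD 0 ((0 : Int), (0 : Int))]   -- comb[0]; Pre_ guarantees comb ≠ []
  let fin := dfsLoop comb 13 queue visited
  if false ∈ fin then false else true

-- ===== PORT B =====
-- abs(comb[i][0]-comb[j][0]) + abs(comb[i][1]-comb[j][1]) == 1
def adjB (p q : Int × Int) : Bool := (p.1 - q.1).natAbs + (p.2 - q.2).natAbs == 1

-- one saturation round: reach = [reach[i] or any(reach[j] and adjacent) for i in range(7)]
def stepB (comb : List (Int × Int)) (reach : List Bool) : List Bool :=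
  (List.range 7).map (fun i =>
    reach.getD i false ||
      (List.range 7).any (fun j =>
        reach.getD j false && adjB (comb.getD i ((0 : Int), (0 : Int))) (comb.getD j ((0 : Int), (0 : Int)))))

def dfs_alt (comb : List (Int × Int)) : Bool :=
  -- if len(comb) != 7 or len(set(comb)) != 7: return False
  if comb.length != 7 || (PySem.Set.ofList comb).length != 7 then false
  else
    let r0 := (List.range 7).map (fun i => i == 0)
    ((List.range 6).foldl (fun r _ => stepB comb r) r0).all id

-- ===== PRECONDITION & SPEC =====
-- Pre_ excludes the empty list, where A raises IndexError at comb[0], and lists longer than 7,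
-- where A raises IndexError exactly when the BFS reaches a cell of list-index ≥ 7 — a
-- reachability condition with no closed form (on the longer lists it does not raise on, A
-- returns an accidental value of its 7-slot visited list, which B does not reproduce).
def Pre_dfs (comb : List (Int × Int)) : Prop := comb ≠ [] ∧ comb.length ≤ 7
instance (comb : List (Int × Int)) : Decidable (Pre_dfs comb) := by unfold Pre_dfs; infer_instance

def pvWitness_dfs : (List (Int × Int)) :=
  [(0, 0), (0, 1), (0, 2), (0, 3), (0, 4), (0, 5), (0, 6)]

def Spec_dfs (comb : List (Int × Int)) (out : Bool) : Prop := out = dfs_alt comb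
instance (comb : List (Int × Int)) (out : Bool) : Decidable (Spec_dfs comb out) := by unfold Spec_dfs; infer_instance

-- ===== CLAIM (what is proved, stated in full; the proofs are below) =====
def Claim_equal_dfs : Prop := ∀ (comb : List (Int × Int)), Dom_dfs comb → Pre_dfs comb → Spec_dfs comb (dfs comb)

-- ===== LEMMAS AND PROOFS =====

-- the cell at index i, and the adjacency/reachability relations on indices 0..6
def cellOf (comb : List (Int × Int)) (i : Nat) : Int × Int := comb.getD i ((0 : Int), (0 : Int))

def AdjI (comb : List (Int × Int)) (i j : Nat) : Prop :=
  i < 7 ∧ j < 7 ∧ adjB (cellOf comb i) (cellOf comb j) = true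

def ReachI (comb : List (Int × Int)) (i : Nat) : Prop :=
  Relation.ReflTransGen (AdjI comb) 0 i

theorem adjB_symm (p q : Int × Int) : adjB p q = adjB q p := by
  unfold adjB; congr 1; omega

theorem adjB_iff (p q : Int × Int) : adjB p q = true ↔
    (q = (p.1 - 1, p.2) ∨ q = (p.1 + 1, p.2) ∨ q = (p.1, p.2 - 1) ∨ q = (p.1, p.2 + 1)) := by
  simp [adjB, Prod.ext_iff]
  omega


-- small getD utilities used by both sides
theorem getD_set_bool (l : List Bool) (n i : Nat) (v d : Bool) :
    (l.set n v).getD i d = if i = n ∧ n < l.length then v else l.getD i d := by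
  by_cases hi : i < l.length
  · rw [List.getD_eq_getElem _ _ (by simpa using hi), List.getElem_set,
        List.getD_eq_getElem _ _ hi]
    split_ifs with h1 h2 h2
    · rfl
    · exact absurd ⟨h1.symm, h1 ▸ hi⟩ h2
    · exact absurd h2.1.symm h1
    · rfl
  · rw [List.getD_eq_default _ _ (by simpa using Nat.le_of_not_lt hi),
        List.getD_eq_default _ _ (Nat.le_of_not_lt hi)]
    have : ¬ (i = n ∧ n < l.length) := by rintro ⟨rfl, h⟩; exact hi h
    simp [this]

theorem count_false_set (l : List Bool) (n : Nat) (hn : n < l.length)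
    (hv : l.getD n false = false) : (l.set n true).count false + 1 = l.count false := by
  induction l generalizing n with
  | nil => simp at hn
  | cons b t ih =>
    cases n with
    | zero =>
      simp [List.getD] at hv
      simp [List.set, hv]
    | succ m =>
      have hm : m < t.length := by simpa using hn
      have hv' : t.getD m false = false := by simpa [List.getD] using hv
      simp only [List.set, List.count_cons]
      have := ih m hm hv'
      omega

-- ---------- B side: the saturation iteration ----------
def iterB (comb : List (Int × Int)) : Nat → List Bool
  | 0 => (List.range 7).map (fun i => i == 0)
  | n + 1 => stepB comb (iterB comb n)

theorem ofList_sublist (l : List (Int × Int)) : (PySem.Set.ofList l).Sublist l := by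
  induction l with
  | nil => simp [PySem.Set.ofList]
  | cons x xs ih =>
    rw [PySem.Set.ofList_cons]
    refine List.Sublist.cons₂ x (List.Sublist.trans ?_ ih)
    simp only [PySem.Set.discard]
    exact List.filter_sublist

theorem ofList_length_iff (l : List (Int × Int)) :
    (PySem.Set.ofList l).length = l.length ↔ l.Nodup := by
  constructor
  · intro h
    rw [← (ofList_sublist l).eq_of_length h]
    exact PySem.Set.nodup_ofList l
  · intro h; rw [PySem.Set.ofList_eq_self_of_nodup l h]

theorem dfs_alt_eq_iterB (comb : List (Int × Int)) (h7 : comb.length = 7)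
    (hnd : comb.Nodup) : dfs_alt comb = (iterB comb 6).all id := by
  have hol : (PySem.Set.ofList comb).length = 7 := by
    rw [(ofList_length_iff comb).mpr hnd, h7]
  rw [dfs_alt, if_neg (by simp [h7, hol])]
  rfl

theorem dfs_alt_false (comb : List (Int × Int)) (h : ¬ (comb.length = 7 ∧ comb.Nodup)) :
    dfs_alt comb = false := by
  rw [dfs_alt]
  by_cases h7 : comb.length = 7
  · have hnd : ¬ comb.Nodup := fun hnd => h ⟨h7, hnd⟩
    have : (PySem.Set.ofList comb).length ≠ 7 := fun he =>
      hnd ((ofList_length_iff comb).mp (by rw [he, h7]))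
    rw [if_pos (by simp [this])]
  · rw [if_pos (by simp [h7])]

theorem length_stepB (comb : List (Int × Int)) (r : List Bool) : (stepB comb r).length = 7 := by
  simp [stepB]

theorem length_iterB (comb : List (Int × Int)) (n : Nat) : (iterB comb n).length = 7 := by
  cases n with
  | zero => simp [iterB]
  | succ m => simp [iterB, length_stepB]

theorem stepB_getD (comb : List (Int × Int)) (r : List Bool) (i : Nat) (hi : i < 7) :
    (stepB comb r).getD i false =
      (r.getD i false ||
        (List.range 7).any (fun j => r.getD j false && adjB (cellOf comb i) (cellOf comb j))) := by
  unfold stepB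
  rw [List.getD_eq_getElem _ _ (by simpa using hi)]
  simp [cellOf]

theorem iterB_zero_getD_iff (comb : List (Int × Int)) (i : Nat) :
    ((iterB comb 0).getD i false = true) ↔ i = 0 := by
  by_cases hi : i < 7
  · rw [show iterB comb 0 = (List.range 7).map (fun i => i == 0) from rfl,
       List.getD_eq_getElem _ _ (by simpa using hi)]
    simp
  · rw [List.getD_eq_default _ _ (by rw [length_iterB]; omega)]
    simp; omega

theorem iterB_mono (comb : List (Int × Int)) (n i : Nat)
    (h : (iterB comb n).getD i false = true) : (iterB comb (n + 1)).getD i false = true := by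
  by_cases hi : i < 7
  · rw [show iterB comb (n + 1) = stepB comb (iterB comb n) from rfl, stepB_getD comb _ i hi, h]
    rfl
  · rw [List.getD_eq_default _ _ (by rw [length_iterB]; omega)] at h
    exact absurd h (by simp)

theorem iterB_mono_le (comb : List (Int × Int)) (m n i : Nat) (hmn : m ≤ n)
    (h : (iterB comb m).getD i false = true) : (iterB comb n).getD i false = true := by
  induction n with
  | zero => have : m = 0 := by omega
            subst this; exact h
  | succ k ih =>
    rcases Nat.lt_or_ge m (k + 1) with hlt | hge
    · exact iterB_mono comb k i (ih (by omega))
    · have : m = k + 1 := by omega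
      subst this; exact h

theorem iterB_sound (comb : List (Int × Int)) (n i : Nat) (hi : i < 7)
    (h : (iterB comb n).getD i false = true) : ReachI comb i := by
  induction n generalizing i with
  | zero =>
    have := (iterB_zero_getD_iff comb i).1 h
    subst this; exact Relation.ReflTransGen.refl
  | succ k ih =>
    rw [show iterB comb (k + 1) = stepB comb (iterB comb k) from rfl, stepB_getD comb _ i hi] at h
    rcases Bool.or_eq_true_iff.mp h with h' | h'
    · exact ih i hi h'
    · obtain ⟨j, hjmem, hj⟩ := List.any_eq_true.mp h'
      have hj7 : j < 7 := List.mem_range.mp hjmem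
      obtain ⟨hjv, hadj⟩ := Bool.and_eq_true_iff.mp hj
      exact Relation.ReflTransGen.tail (ih j hj7 hjv)
        ⟨hj7, hi, by rw [adjB_symm]; exact hadj⟩

theorem iterB_fix_complete (comb : List (Int × Int)) (n : Nat)
    (hfix : iterB comb (n + 1) = iterB comb n) (i : Nat) (hr : ReachI comb i) :
    (iterB comb n).getD i false = true := by
  induction hr with
  | refl => exact iterB_mono_le comb 0 n 0 (Nat.zero_le n) ((iterB_zero_getD_iff comb 0).2 rfl)
  | tail hx hadj ih =>
    obtain ⟨hb7, hc7, hadjB⟩ := hadj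
    rw [← hfix, show iterB comb (n + 1) = stepB comb (iterB comb n) from rfl,
        stepB_getD comb _ _ hc7]
    refine Bool.or_eq_true_iff.mpr (Or.inr (List.any_eq_true.mpr ⟨_, List.mem_range.mpr hb7, ?_⟩))
    rw [ih, adjB_symm]
    simpa using hadjB

theorem iterB_fix_ge (comb : List (Int × Int)) (n m : Nat)
    (hfix : iterB comb (n + 1) = iterB comb n) (h : n ≤ m) : iterB comb m = iterB comb n := by
  induction m with
  | zero => have : n = 0 := by omega
            rw [this]
  | succ k ih =>
    rcases Nat.lt_or_ge n (k + 1) with hlt | hge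
    · have hk := ih (by omega)
      calc iterB comb (k + 1) = stepB comb (iterB comb k) := rfl
        _ = stepB comb (iterB comb n) := by rw [hk]
        _ = iterB comb (n + 1) := rfl
        _ = iterB comb n := hfix
    · have : n = k + 1 := by omega
      rw [this]

def SB (comb : List (Int × Int)) (n : Nat) : Finset Nat :=
  (Finset.range 7).filter (fun i => (iterB comb n).getD i false = true)

theorem SB_mono (comb : List (Int × Int)) (n : Nat) : SB comb n ⊆ SB comb (n + 1) := by
  intro i hi
  rw [SB, Finset.mem_filter] at hi ⊢
  exact ⟨hi.1, iterB_mono comb n i hi.2⟩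

theorem SB_zero_card (comb : List (Int × Int)) : (SB comb 0).card = 1 := by
  have : SB comb 0 = {0} := by
    ext i
    simp only [SB, Finset.mem_filter, Finset.mem_range, Finset.mem_singleton,
      iterB_zero_getD_iff]
    omega
  rw [this]; exact Finset.card_singleton 0

theorem eq_of_SB_eq (comb : List (Int × Int)) (n : Nat) (h : SB comb (n + 1) = SB comb n) :
    iterB comb (n + 1) = iterB comb n := by
  apply List.ext_getElem (by rw [length_iterB, length_iterB])
  intro i h1 h2
  rw [length_iterB] at h1
  have hmem := Finset.ext_iff.mp h i
  simp only [SB, Finset.mem_filter, Finset.mem_range] at hmem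
  rw [← List.getD_eq_getElem _ false h1, ← List.getD_eq_getElem _ false h2]
  by_cases hv : (iterB comb (n + 1)).getD i false = true
  · rw [hv, (hmem.mp ⟨h1, hv⟩).2]
  · have hw : ¬ (iterB comb n).getD i false = true := fun hw => hv (hmem.mpr ⟨h1, hw⟩).2
    rw [Bool.not_eq_true] at hv hw
    rw [hv, hw]

theorem iterB_complete (comb : List (Int × Int)) (i : Nat) (hi : i < 7)
    (hr : ReachI comb i) : (iterB comb 6).getD i false = true := by
  by_cases hfix : ∃ n, n < 6 ∧ iterB comb (n + 1) = iterB comb n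
  · obtain ⟨n, hn, hfx⟩ := hfix
    rw [iterB_fix_ge comb n 6 hfx (by omega)]
    exact iterB_fix_complete comb n hfx i hr
  · push_neg at hfix
    have hcard : ∀ n, n ≤ 6 → n + 1 ≤ (SB comb n).card := by
      intro n
      induction n with
      | zero => intro _; rw [SB_zero_card]
      | succ k ih =>
        intro h6
        have hne := hfix k (by omega)
        have hsub : SB comb k ⊂ SB comb (k + 1) :=
          (SB_mono comb k).ssubset_of_ne (fun he => hne (eq_of_SB_eq comb k he.symm))
        have h1 := Finset.card_lt_card hsub
        have h2 := ih (by omega)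
        omega
    have h7c : 7 ≤ (SB comb 6).card := hcard 6 le_rfl
    have heq : SB comb 6 = Finset.range 7 :=
      Finset.eq_of_subset_of_card_le (Finset.filter_subset _ _) (by simpa using h7c)
    have : i ∈ SB comb 6 := heq ▸ Finset.mem_range.mpr hi
    exact (Finset.mem_filter.mp this).2

theorem dfs_alt_iff (comb : List (Int × Int)) (h7 : comb.length = 7) (hnd : comb.Nodup) :
    dfs_alt comb = true ↔ (∀ i, i < 7 → ReachI comb i) := by
  rw [dfs_alt_eq_iterB comb h7 hnd, List.all_eq_true]
  constructor
  · intro h i hi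
    have hi' : i < (iterB comb 6).length := by rw [length_iterB]; exact hi
    refine iterB_sound comb 6 i hi ?_
    rw [List.getD_eq_getElem _ _ hi']
    exact h _ (List.getElem_mem hi')
  · intro h x hx
    obtain ⟨i, hi, rfl⟩ := List.mem_iff_getElem.mp hx
    have hi7 : i < 7 := by rw [length_iterB] at hi; exact hi
    rw [← List.getD_eq_getElem _ false hi]
    exact iterB_complete comb i hi7 (h i hi7)

-- ---------- A side: BFS loop invariants ----------
theorem cellOf_mem (comb : List (Int × Int)) (h7 : comb.length = 7) (j : Nat) (hj : j < 7) :
    cellOf comb j ∈ comb := by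
  have hj' : j < comb.length := by omega
  rw [cellOf, List.getD_eq_getElem _ _ hj']
  exact List.getElem_mem hj'

theorem cellOf_inj (comb : List (Int × Int)) (h7 : comb.length = 7) (hnd : comb.Nodup)
    (i j : Nat) (hi : i < 7) (hj : j < 7) (h : cellOf comb i = cellOf comb j) : i = j := by
  have hi' : i < comb.length := by omega
  have hj' : j < comb.length := by omega
  rw [cellOf, cellOf, List.getD_eq_getElem _ _ hi', List.getD_eq_getElem _ _ hj'] at h
  exact (List.Nodup.getElem_inj_iff hnd).mp h

theorem index_some (comb : List (Int × Int)) (h7 : comb.length = 7) (p : Int × Int)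
    (hp : p ∈ comb) :
    ∃ k, PySem.List.index? comb p = some k ∧ k < 7 ∧ cellOf comb k = p := by
  have hs : (PySem.List.index? comb p).isSome := by simp [hp]
  obtain ⟨k, hk⟩ := Option.isSome_iff_exists.mp hs
  obtain ⟨hk7, hval, -⟩ := PySem.List.getElem_of_index?_eq_some hk
  exact ⟨k, hk, by omega, by rw [cellOf, List.getD_eq_getElem _ _ hk7]; exact hval⟩

theorem adjB_dir (x y : Int) (k : Nat) (hk : k < 4) :
    adjB (x, y) (x + dxA.getD k 0, y + dyA.getD k 0) = true := by
  interval_cases k <;> simp [adjB, dxA, dyA]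

-- the three shapes one Python neighbour check can take
theorem dfsStep_eq_skip_notmem (comb : List (Int × Int)) (x y : Int)
    (st : List (Int × Int) × List Bool) (k : Nat)
    (hmem : (x + dxA.getD k 0, y + dyA.getD k 0) ∉ comb) :
    dfsStep comb x y st k = st := by
  have hmem' : (x + dxA[k]?.getD 0, y + dyA[k]?.getD 0) ∉ comb := by simpa using hmem
  simp [dfsStep, hmem']

theorem dfsStep_eq_skip_mem (comb : List (Int × Int)) (x y : Int)
    (st : List (Int × Int) × List Bool) (k : Nat) (idx : Nat)
    (hmem : (x + dxA.getD k 0, y + dyA.getD k 0) ∈ comb)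
    (hidx : PySem.List.index? comb (x + dxA.getD k 0, y + dyA.getD k 0) = some idx)
    (hvis : st.2.getD idx false = true) :
    dfsStep comb x y st k = st := by
  have hmem' : (x + dxA[k]?.getD 0, y + dyA[k]?.getD 0) ∈ comb := by simpa using hmem
  have hidx' : List.idxOf? (x + dxA[k]?.getD 0, y + dyA[k]?.getD 0) comb = some idx := by
    simpa [PySem.List.index?_eq_idxOf?] using hidx
  have hvis' : st.2[idx]?.getD false = true := by simpa [List.getD] using hvis
  simp [dfsStep, hmem', hidx', hvis']

theorem dfsStep_eq_add (comb : List (Int × Int)) (x y : Int)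
    (st : List (Int × Int) × List Bool) (k : Nat) (idx : Nat)
    (hmem : (x + dxA.getD k 0, y + dyA.getD k 0) ∈ comb)
    (hidx : PySem.List.index? comb (x + dxA.getD k 0, y + dyA.getD k 0) = some idx)
    (hvis : st.2.getD idx false = false) :
    dfsStep comb x y st k =
      (st.1 ++ [(x + dxA.getD k 0, y + dyA.getD k 0)], st.2.set idx true) := by
  have hmem' : (x + dxA[k]?.getD 0, y + dyA[k]?.getD 0) ∈ comb := by simpa using hmem
  have hidx' : List.idxOf? (x + dxA[k]?.getD 0, y + dyA[k]?.getD 0) comb = some idx := by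
    simpa [PySem.List.index?_eq_idxOf?] using hidx
  have hvis' : st.2[idx]?.getD false = false := by simpa [List.getD] using hvis
  simp [dfsStep, hmem', hidx', hvis', List.getD]

theorem dfsStep_props (comb : List (Int × Int)) (h7 : comb.length = 7) (hnd : comb.Nodup)
    (x y : Int) (st : List (Int × Int) × List Bool) (k : Nat) (hk : k < 4)
    (hlen : st.2.length = 7) :
    (dfsStep comb x y st k).2.length = 7 ∧
    (∀ q ∈ st.1, q ∈ (dfsStep comb x y st k).1) ∧
    (∀ i, st.2.getD i false = true → (dfsStep comb x y st k).2.getD i false = true) ∧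
    (∀ i, (dfsStep comb x y st k).2.getD i false = true →
        st.2.getD i false = true ∨
          (i < 7 ∧ adjB (x, y) (cellOf comb i) = true ∧
            cellOf comb i ∈ (dfsStep comb x y st k).1)) ∧
    (∀ q ∈ (dfsStep comb x y st k).1, q ∈ st.1 ∨
        (∃ j, j < 7 ∧ cellOf comb j = q ∧ (dfsStep comb x y st k).2.getD j false = true ∧
          adjB (x, y) q = true)) ∧
    (∀ j, j < 7 → cellOf comb j = (x + dxA.getD k 0, y + dyA.getD k 0) →
        (dfsStep comb x y st k).2.getD j false = true) ∧
    2 * (dfsStep comb x y st k).2.count false + (dfsStep comb x y st k).1.length ≤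
      2 * st.2.count false + st.1.length := by
  by_cases hmem : (x + dxA.getD k 0, y + dyA.getD k 0) ∈ comb
  · obtain ⟨idx, hidx, hidx7, hcell⟩ := index_some comb h7 _ hmem
    by_cases hvis : st.2.getD idx false = true
    · rw [dfsStep_eq_skip_mem comb x y st k idx hmem hidx hvis]
      refine ⟨hlen, fun q hq => hq, fun i h => h, fun i h => Or.inl h,
        fun q hq => Or.inl hq, ?_, le_refl _⟩
      intro j hj hcj
      have : j = idx := cellOf_inj comb h7 hnd j idx hj hidx7 (by rw [hcj, hcell])
      rw [this]; exact hvis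
    · rw [Bool.not_eq_true] at hvis
      rw [dfsStep_eq_add comb x y st k idx hmem hidx hvis]
      have hidxlen : idx < st.2.length := by omega
      have hnew : (st.2.set idx true).getD idx false = true := by
        rw [getD_set_bool]; simp [hidxlen]
      refine ⟨by simp [hlen], fun q hq => List.mem_append_left _ hq, ?_, ?_, ?_, ?_, ?_⟩
      · intro i h
        rw [getD_set_bool]
        split_ifs with hc
        · rfl
        · exact h
      · intro i h
        rw [getD_set_bool] at h
        split_ifs at h with hc
        · right
          obtain ⟨rfl, -⟩ := hc
          refine ⟨hidx7, by rw [hcell]; exact adjB_dir x y k hk, ?_⟩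
          rw [hcell]
          exact List.mem_append_right _ (List.mem_singleton.mpr rfl)
        · exact Or.inl h
      · intro q hq
        rcases List.mem_append.mp hq with hq | hq
        · exact Or.inl hq
        · right
          rw [List.mem_singleton] at hq
          exact ⟨idx, hidx7, by rw [hcell, hq], hnew, by rw [hq]; exact adjB_dir x y k hk⟩
      · intro j hj hcj
        have : j = idx := cellOf_inj comb h7 hnd j idx hj hidx7 (by rw [hcj, hcell])
        rw [this]; exact hnew
      · have hcnt := count_false_set st.2 idx hidxlen hvis
        simp only [List.length_append, List.length_singleton]
        omega
  · rw [dfsStep_eq_skip_notmem comb x y st k hmem]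
    refine ⟨hlen, fun q hq => hq, fun i h => h, fun i h => Or.inl h,
      fun q hq => Or.inl hq, ?_, le_refl _⟩
    intro j hj hcj
    exact absurd (hcj ▸ cellOf_mem comb h7 j hj) hmem

theorem foldl_step_props (comb : List (Int × Int)) (h7 : comb.length = 7) (hnd : comb.Nodup)
    (x y : Int) (rest : List (Int × Int)) (vis : List Bool) (hlen : vis.length = 7)
    (S : List (Int × Int) × List Bool)
    (hS : S = (List.range 4).foldl (dfsStep comb x y) (rest, vis)) :
    S.2.length = 7 ∧
    (∀ q ∈ rest, q ∈ S.1) ∧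
    (∀ i, vis.getD i false = true → S.2.getD i false = true) ∧
    (∀ i, S.2.getD i false = true → vis.getD i false = true ∨
        (i < 7 ∧ adjB (x, y) (cellOf comb i) = true ∧ cellOf comb i ∈ S.1)) ∧
    (∀ q ∈ S.1, q ∈ rest ∨
        (∃ j, j < 7 ∧ cellOf comb j = q ∧ S.2.getD j false = true ∧ adjB (x, y) q = true)) ∧
    (∀ j, j < 7 → adjB (x, y) (cellOf comb j) = true → S.2.getD j false = true) ∧
    2 * S.2.count false + S.1.length ≤ 2 * vis.count false + rest.length := by
  obtain ⟨l0, q0, m0, b0, n0, c0, f0⟩ :=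
    dfsStep_props comb h7 hnd x y (rest, vis) 0 (by omega) hlen
  obtain ⟨l1, q1, m1, b1, n1, c1, f1⟩ :=
    dfsStep_props comb h7 hnd x y (dfsStep comb x y (rest, vis) 0) 1 (by omega) l0
  obtain ⟨l2, q2, m2, b2, n2, c2, f2⟩ :=
    dfsStep_props comb h7 hnd x y
      (dfsStep comb x y (dfsStep comb x y (rest, vis) 0) 1) 2 (by omega) l1
  obtain ⟨l3, q3, m3, b3, n3, c3, f3⟩ :=
    dfsStep_props comb h7 hnd x y
      (dfsStep comb x y (dfsStep comb x y (dfsStep comb x y (rest, vis) 0) 1) 2) 3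
      (by omega) l2
  have hSe : S = dfsStep comb x y
      (dfsStep comb x y (dfsStep comb x y (dfsStep comb x y (rest, vis) 0) 1) 2) 3 := by
    rw [hS]; rfl
  subst hSe
  refine ⟨l3, ?_, ?_, ?_, ?_, ?_, ?_⟩
  · exact fun q hq => q3 _ (q2 _ (q1 _ (q0 _ hq)))
  · exact fun i h => m3 _ (m2 _ (m1 _ (m0 _ h)))
  · intro i h
    rcases b3 i h with h | ⟨hi7, hadj, hm⟩
    · rcases b2 i h with h | ⟨hi7, hadj, hm⟩
      · rcases b1 i h with h | ⟨hi7, hadj, hm⟩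
        · rcases b0 i h with h | ⟨hi7, hadj, hm⟩
          · exact Or.inl h
          · exact Or.inr ⟨hi7, hadj, q3 _ (q2 _ (q1 _ hm))⟩
        · exact Or.inr ⟨hi7, hadj, q3 _ (q2 _ hm)⟩
      · exact Or.inr ⟨hi7, hadj, q3 _ hm⟩
    · exact Or.inr ⟨hi7, hadj, hm⟩
  · intro q hq
    rcases n3 q hq with h | ⟨j, hj, hc, hv, ha⟩
    · rcases n2 q h with h | ⟨j, hj, hc, hv, ha⟩
      · rcases n1 q h with h | ⟨j, hj, hc, hv, ha⟩
        · rcases n0 q h with h | ⟨j, hj, hc, hv, ha⟩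
          · exact Or.inl h
          · exact Or.inr ⟨j, hj, hc, m3 _ (m2 _ (m1 _ hv)), ha⟩
        · exact Or.inr ⟨j, hj, hc, m3 _ (m2 _ hv), ha⟩
      · exact Or.inr ⟨j, hj, hc, m3 _ hv, ha⟩
    · exact Or.inr ⟨j, hj, hc, hv, ha⟩
  · intro j hj hadj
    rcases (adjB_iff (x, y) (cellOf comb j)).mp hadj with hc | hc | hc | hc
    · exact m3 _ (m2 _ (m1 _ (c0 j hj (by rw [hc]; simp [dxA, dyA]; ring))))
    · exact m3 _ (m2 _ (c1 j hj (by rw [hc]; simp [dxA, dyA])))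
    · exact m3 _ (c2 j hj (by rw [hc]; simp [dxA, dyA]; ring))
    · exact c3 j hj (by rw [hc]; simp [dxA, dyA])
  · dsimp only at f0
    omega

def InvA (comb : List (Int × Int)) (Q : List (Int × Int)) (vis : List Bool) : Prop :=
  vis.length = 7 ∧
  vis.getD 0 false = true ∧
  (∀ p ∈ Q, ∃ i, i < 7 ∧ cellOf comb i = p ∧ vis.getD i false = true) ∧
  (∀ i, i < 7 → vis.getD i false = true → ReachI comb i) ∧
  (∀ i j, vis.getD i false = true → AdjI comb i j →
      vis.getD j false = true ∨ cellOf comb i ∈ Q)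

theorem exit_iff (comb : List (Int × Int)) (vis : List Bool) (hlen : vis.length = 7)
    (hInv : InvA comb [] vis) (i : Nat) (hi : i < 7) :
    (vis.getD i false = true ↔ ReachI comb i) := by
  obtain ⟨-, h0, -, hsound, hclosed⟩ := hInv
  refine ⟨hsound i hi, ?_⟩
  intro hr
  induction hr with
  | refl => exact h0
  | tail hx hadj ih =>
    rcases hclosed _ _ (ih hadj.1) hadj with h | h
    · exact h
    · simp at h

theorem loop_main (comb : List (Int × Int)) (h7 : comb.length = 7) (hnd : comb.Nodup) :
    ∀ (fuel : Nat) (Q : List (Int × Int)) (vis : List Bool),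
    InvA comb Q vis → 2 * vis.count false + Q.length ≤ fuel →
    (dfsLoop comb fuel Q vis).length = 7 ∧
    (∀ i, i < 7 → ((dfsLoop comb fuel Q vis).getD i false = true ↔ ReachI comb i)) := by
  intro fuel
  induction fuel with
  | zero =>
    intro Q vis hInv hfuel
    have hQ : Q = [] := by
      cases Q with
      | nil => rfl
      | cons a t => simp at hfuel
    subst hQ
    exact ⟨hInv.1, fun i hi => by
      rw [show dfsLoop comb 0 [] vis = vis from rfl]
      exact exit_iff comb vis hInv.1 hInv i hi⟩
  | succ f ih =>
    intro Q vis hInv hfuel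
    cases Q with
    | nil =>
      exact ⟨hInv.1, fun i hi => by
        rw [show dfsLoop comb (f + 1) [] vis = vis from rfl]
        exact exit_iff comb vis hInv.1 hInv i hi⟩
    | cons hd rest =>
      obtain ⟨x, y⟩ := hd
      obtain ⟨hlen, h0, hQinv, hsound, hclosed⟩ := hInv
      obtain ⟨i0, hi07, hc0, hv0⟩ := hQinv (x, y) List.mem_cons_self
      obtain ⟨lS, qS, mS, bS, nS, cS, fS⟩ :=
        foldl_step_props comb h7 hnd x y rest vis hlen
          ((List.range 4).foldl (dfsStep comb x y) (rest, vis)) rfl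
      have hred : dfsLoop comb (f + 1) ((x, y) :: rest) vis =
          dfsLoop comb f ((List.range 4).foldl (dfsStep comb x y) (rest, vis)).1
            ((List.range 4).foldl (dfsStep comb x y) (rest, vis)).2 := rfl
      rw [hred]
      refine ih _ _ ⟨lS, mS _ h0, ?_, ?_, ?_⟩ ?_
      · intro p hp
        rcases nS p hp with hp' | ⟨j, hj, hc, hv, -⟩
        · obtain ⟨i, hi, hc, hv⟩ := hQinv p (List.mem_cons_of_mem _ hp')
          exact ⟨i, hi, hc, mS _ hv⟩
        · exact ⟨j, hj, hc, hv⟩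
      · intro i hi hv
        rcases bS i hv with hv' | ⟨hi7, hadj, -⟩
        · exact hsound i hi hv'
        · exact Relation.ReflTransGen.tail (hsound i0 hi07 hv0)
            ⟨hi07, hi7, by rw [hc0]; exact hadj⟩
      · intro i j hvi hadj
        rcases bS i hvi with hvi' | ⟨hi7, -, hm⟩
        · rcases hclosed i j hvi' hadj with h | h
          · exact Or.inl (mS _ h)
          · rcases List.mem_cons.mp h with h | h
            · -- cellOf i = (x, y): i is the popped index, its neighbours are all marked
              have : i = i0 := cellOf_inj comb h7 hnd i i0 hadj.1 hi07 (by rw [h, hc0])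
              refine Or.inl (cS j hadj.2.1 ?_)
              rw [← h]
              exact hadj.2.2
            · exact Or.inr (qS _ h)
        · exact Or.inr hm
      · have : ((x, y) :: rest).length = rest.length + 1 := rfl
        omega

theorem initial_InvA (comb : List (Int × Int)) :
    InvA comb [comb.getD 0 ((0 : Int), (0 : Int))] ((List.replicate 7 false).set 0 true) := by
  refine ⟨by simp, rfl, ?_, ?_, ?_⟩
  · intro p hp
    rw [List.mem_singleton] at hp
    exact ⟨0, by omega, by rw [cellOf, hp], rfl⟩
  · intro i hi hv
    interval_cases i
    · exact Relation.ReflTransGen.refl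
    all_goals exact absurd hv (by decide)
  · intro i j hvi hadj
    have hi : i < 7 := hadj.1
    interval_cases i
    · exact Or.inr (List.mem_singleton.mpr rfl)
    all_goals exact absurd hvi (by decide)

theorem dfs_iff (comb : List (Int × Int)) (h7 : comb.length = 7) (hnd : comb.Nodup) :
    dfs comb = true ↔ (∀ i, i < 7 → ReachI comb i) := by
  have hcnt : ((List.replicate 7 false).set 0 true).count false = 6 := rfl
  obtain ⟨hlen, hiff⟩ := loop_main comb h7 hnd 13 [comb.getD 0 ((0 : Int), (0 : Int))]
    ((List.replicate 7 false).set 0 true) (initial_InvA comb) (by rw [hcnt]; rfl)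
  rw [show dfs comb = (if false ∈ dfsLoop comb 13 [comb.getD 0 ((0 : Int), (0 : Int))]
      ((List.replicate 7 false).set 0 true) then false else true) from rfl]
  split_ifs with hf
  · constructor
    · intro h; cases h
    · intro hP
      exfalso
      obtain ⟨i, hi, hval⟩ := List.mem_iff_getElem.mp hf
      have hi7 : i < 7 := by rw [hlen] at hi; exact hi
      have htrue := (hiff i hi7).mpr (hP i hi7)
      rw [List.getD_eq_getElem _ _ hi, hval] at htrue
      cases htrue
  · constructor
    · intro _ i hi7
      have hi : i < (dfsLoop comb 13 [comb.getD 0 ((0 : Int), (0 : Int))]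
          ((List.replicate 7 false).set 0 true)).length := by rw [hlen]; exact hi7
      refine (hiff i hi7).mp ?_
      rw [List.getD_eq_getElem _ _ hi]
      rcases Bool.eq_false_or_eq_true ((dfsLoop comb 13 [comb.getD 0 ((0 : Int), (0 : Int))]
          ((List.replicate 7 false).set 0 true))[i]) with hb | hb
      · exact hb
      · refine absurd ?_ hf
        have hm := List.getElem_mem hi
        rwa [hb] at hm
    · intro _; rfl

-- ---------- the failing cases: fewer than 7 cells, or a duplicated cell ----------
theorem dup_of_not_nodup (l : List (Int × Int)) (h : ¬ l.Nodup) :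
    ∃ (i j : Nat) (hi : i < l.length) (hj : j < l.length), i < j ∧ l[i] = l[j] := by
  rw [List.nodup_iff_injective_get] at h
  rw [Function.not_injective_iff] at h
  obtain ⟨a, b, he, hne⟩ := h
  rcases Nat.lt_or_ge a.val b.val with hab | hab
  · exact ⟨a, b, a.isLt, b.isLt, hab, by simpa using he⟩
  · exact ⟨b, a, b.isLt, a.isLt, by have := Fin.val_ne_of_ne hne; omega, by simpa using he.symm⟩

theorem dfsStep_length (comb : List (Int × Int)) (x y : Int)
    (st : List (Int × Int) × List Bool) (k : Nat) :
    (dfsStep comb x y st k).2.length = st.2.length := by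
  by_cases hmem : (x + dxA.getD k 0, y + dyA.getD k 0) ∈ comb
  · obtain ⟨idx, hidx⟩ := Option.isSome_iff_exists.mp
      (by simpa using hmem : (PySem.List.index? comb (x + dxA.getD k 0, y + dyA.getD k 0)).isSome)
    rcases Bool.eq_false_or_eq_true (st.2.getD idx false) with hv | hv
    · rw [dfsStep_eq_skip_mem comb x y st k idx hmem hidx hv]
    · rw [dfsStep_eq_add comb x y st k idx hmem hidx hv]
      simp
  · rw [dfsStep_eq_skip_notmem comb x y st k hmem]

theorem dfsStep_preserve_false (comb : List (Int × Int)) (x y : Int)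
    (st : List (Int × Int) × List Bool) (k : Nat) (j : Nat)
    (hj : ∀ p ∈ comb, PySem.List.index? comb p ≠ some j)
    (h : st.2.getD j false = false) : (dfsStep comb x y st k).2.getD j false = false := by
  by_cases hmem : (x + dxA.getD k 0, y + dyA.getD k 0) ∈ comb
  · obtain ⟨idx, hidx⟩ := Option.isSome_iff_exists.mp
      (by simpa using hmem : (PySem.List.index? comb (x + dxA.getD k 0, y + dyA.getD k 0)).isSome)
    rcases Bool.eq_false_or_eq_true (st.2.getD idx false) with hv | hv
    · rw [dfsStep_eq_skip_mem comb x y st k idx hmem hidx hv]; exact h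
    · rw [dfsStep_eq_add comb x y st k idx hmem hidx hv, getD_set_bool]
      split_ifs with hc
      · exact absurd (hc.1 ▸ hidx) (hj _ hmem)
      · exact h
  · rw [dfsStep_eq_skip_notmem comb x y st k hmem]; exact h

theorem loop_length (comb : List (Int × Int)) :
    ∀ (fuel : Nat) (Q : List (Int × Int)) (vis : List Bool),
    (dfsLoop comb fuel Q vis).length = vis.length := by
  intro fuel
  induction fuel with
  | zero => intro Q vis; rfl
  | succ f ih =>
    intro Q vis
    cases Q with
    | nil => rfl
    | cons hd rest =>
      obtain ⟨x, y⟩ := hd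
      rw [show dfsLoop comb (f + 1) ((x, y) :: rest) vis =
        dfsLoop comb f ((List.range 4).foldl (dfsStep comb x y) (rest, vis)).1
          ((List.range 4).foldl (dfsStep comb x y) (rest, vis)).2 from rfl, ih,
        show (List.range 4).foldl (dfsStep comb x y) (rest, vis) =
          dfsStep comb x y (dfsStep comb x y (dfsStep comb x y
            (dfsStep comb x y (rest, vis) 0) 1) 2) 3 from rfl,
        dfsStep_length, dfsStep_length, dfsStep_length, dfsStep_length]

theorem loop_preserve_false (comb : List (Int × Int)) (j : Nat)
    (hj : ∀ p ∈ comb, PySem.List.index? comb p ≠ some j) :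
    ∀ (fuel : Nat) (Q : List (Int × Int)) (vis : List Bool),
    vis.getD j false = false → (dfsLoop comb fuel Q vis).getD j false = false := by
  intro fuel
  induction fuel with
  | zero => intro Q vis h; exact h
  | succ f ih =>
    intro Q vis h
    cases Q with
    | nil => exact h
    | cons hd rest =>
      obtain ⟨x, y⟩ := hd
      rw [show dfsLoop comb (f + 1) ((x, y) :: rest) vis =
        dfsLoop comb f ((List.range 4).foldl (dfsStep comb x y) (rest, vis)).1
          ((List.range 4).foldl (dfsStep comb x y) (rest, vis)).2 from rfl]
      refine ih _ _ ?_
      rw [show (List.range 4).foldl (dfsStep comb x y) (rest, vis) =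
        dfsStep comb x y (dfsStep comb x y (dfsStep comb x y
          (dfsStep comb x y (rest, vis) 0) 1) 2) 3 from rfl]
      exact dfsStep_preserve_false comb x y _ 3 j hj
        (dfsStep_preserve_false comb x y _ 2 j hj
          (dfsStep_preserve_false comb x y _ 1 j hj
            (dfsStep_preserve_false comb x y _ 0 j hj h)))

theorem dfs_false (comb : List (Int × Int)) (hle : comb.length ≤ 7)
    (h : ¬ (comb.length = 7 ∧ comb.Nodup)) : dfs comb = false := by
  obtain ⟨j, hj7, hj0, hj⟩ :
      ∃ j, j < 7 ∧ j ≠ 0 ∧ ∀ p ∈ comb, PySem.List.index? comb p ≠ some j := by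
    by_cases h7 : comb.length = 7
    · have hnd : ¬ comb.Nodup := fun hnd => h ⟨h7, hnd⟩
      obtain ⟨i1, j, hi1, hjl, hij, hdup⟩ := dup_of_not_nodup comb hnd
      refine ⟨j, by omega, by omega, ?_⟩
      intro p hp hidx
      obtain ⟨hjlen, hval, hfirst⟩ := PySem.List.getElem_of_index?_eq_some hidx
      exact hfirst i1 hij (hdup.trans hval)
    · refine ⟨6, by omega, by omega, ?_⟩
      intro p hp hidx
      obtain ⟨hjlen, -, -⟩ := PySem.List.getElem_of_index?_eq_some hidx
      omega
  have hinit : ((List.replicate 7 false).set 0 true).getD j false = false := by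
    rw [getD_set_bool, if_neg (by simp [hj0]),
      List.getD_eq_getElem _ _ (by simp; omega), List.getElem_replicate]
  have hfin := loop_preserve_false comb j hj 13 [comb.getD 0 ((0 : Int), (0 : Int))] _ hinit
  have hlen : (dfsLoop comb 13 [comb.getD 0 ((0 : Int), (0 : Int))]
      ((List.replicate 7 false).set 0 true)).length = 7 := by
    rw [loop_length]; simp
  rw [show dfs comb = (if false ∈ dfsLoop comb 13 [comb.getD 0 ((0 : Int), (0 : Int))]
      ((List.replicate 7 false).set 0 true) then false else true) from rfl]
  have hjlt : j < (dfsLoop comb 13 [comb.getD 0 ((0 : Int), (0 : Int))]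
      ((List.replicate 7 false).set 0 true)).length := by rw [hlen]; exact hj7
  refine if_pos ?_
  have hg : (dfsLoop comb 13 [comb.getD 0 ((0 : Int), (0 : Int))]
      ((List.replicate 7 false).set 0 true))[j] = false := by
    rw [← List.getD_eq_getElem _ false hjlt]; exact hfin
  have hm := List.getElem_mem hjlt
  rwa [hg] at hm

-- ===== VERDICT (by name: the statement is the Claim_ definition above) =====
theorem dfs_spec : Claim_equal_dfs := by
  intro comb _ hpre
  obtain ⟨hne, hle⟩ := hpre
  unfold Spec_dfs
  by_cases h7 : comb.length = 7 ∧ comb.Nodup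
  · obtain ⟨h7, hnd⟩ := h7
    have hA := dfs_iff comb h7 hnd
    have hB := dfs_alt_iff comb h7 hnd
    by_cases hP : ∀ i, i < 7 → ReachI comb i
    · rw [hA.mpr hP, hB.mpr hP]
    · have h1 : dfs comb = false := by
        rcases Bool.eq_false_or_eq_true (dfs comb) with h | h
        · exact absurd (hA.mp h) hP
        · exact h
      have h2 : dfs_alt comb = false := by
        rcases Bool.eq_false_or_eq_true (dfs_alt comb) with h | h
        · exact absurd (hB.mp h) hP
        · exact h
      rw [h1, h2]
  · rw [dfs_false comb hle h7, dfs_alt_false comb h7]
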